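-- pv_equiv track=rewrite | github.com/HmbleCreator/ddin-reservoir | Experiments/ddin_exp15_formant_grounding.py | root_to_chars
-- ===== SOURCE A (Python) =====
-- TRANSLIT = {
--     'A':'A','I':'I','U':'U','R':'R',
--     'kh':'K','gh':'G','ch':'C','jh':'J',
--     'Th':'Q','Dh':'X','th':'H','dh':'W',
--     'ph':'P','bh':'B','sh':'z','sh2':'x','ng':'N',
-- }
--
-- def root_to_chars(root_str):
--     chars, i = [], 0
--     s = root_str
--     while i < len(s):
--         if i+1 < len(s) and s[i:i+2] in TRANSLIT:
--             chars.append(TRANSLIT[s[i:i+2]])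
--             i += 2
--         else:
--             chars.append(TRANSLIT.get(s[i], s[i]))
--             i += 1
--     return chars
-- ===== SOURCE B (Python) =====
-- import re
--
-- TRANSLIT = {
--     'A':'A','I':'I','U':'U','R':'R',
--     'kh':'K','gh':'G','ch':'C','jh':'J',
--     'Th':'Q','Dh':'X','th':'H','dh':'W',
--     'ph':'P','bh':'B','sh':'z','sh2':'x','ng':'N',
-- }
--
-- # the twelve 2-char digraph keys of TRANSLIT (the 'sh2' key is unreachable in A and excluded)
-- _DIGRAPHS = ['kh', 'gh', 'ch', 'jh', 'Th', 'Dh', 'th', 'dh', 'ph', 'bh', 'sh', 'ng']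
-- _TOKEN = re.compile('|'.join(_DIGRAPHS) + r'|[\s\S]')
--
-- def root_to_chars(root_str):
--     return [TRANSLIT.get(tok, tok) for tok in _TOKEN.findall(root_str)]
-- ===== Notes on version B (the rewrite author's own statement) =====
-- stated objective: idiomatic
-- what changed: Replaces the manual index-stepping while loop with a compiled regex whose alternation lists the twelve digraph keys before a catch-all [\s\S], so tokenization is one re.findall and the result is a single comprehension over the tokens.
import Mathlib
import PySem

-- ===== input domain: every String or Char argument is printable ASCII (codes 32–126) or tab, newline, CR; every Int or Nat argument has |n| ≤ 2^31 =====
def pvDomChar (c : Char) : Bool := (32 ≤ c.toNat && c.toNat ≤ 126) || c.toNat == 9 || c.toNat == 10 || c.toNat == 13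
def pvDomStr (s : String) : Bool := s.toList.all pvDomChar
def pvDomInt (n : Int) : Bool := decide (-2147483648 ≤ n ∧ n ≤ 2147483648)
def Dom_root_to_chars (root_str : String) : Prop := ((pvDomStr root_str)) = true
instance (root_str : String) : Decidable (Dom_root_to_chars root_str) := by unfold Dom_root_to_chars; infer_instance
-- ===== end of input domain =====

-- B replaces A's index-stepping while loop by regex tokenization (twelve digraph alternatives, then any
-- single char) followed by one map through the table; equal return values are proved on all of Dom.

-- ===== PORT A =====
def TRANSLIT : PySem.Dict String String := PySem.Dict.ofList
  [("A","A"),("I","I"),("U","U"),("R","R"),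
   ("kh","K"),("gh","G"),("ch","C"),("jh","J"),
   ("Th","Q"),("Dh","X"),("th","H"),("dh","W"),
   ("ph","P"),("bh","B"),("sh","z"),("sh2","x"),("ng","N")]

-- A's while loop: i steps by 2 on a digraph hit, else by 1; 'chars' is the growing accumulator.
def rootLoopA (s : List Char) (i : Nat) (chars : List String) : List String :=
  if h : i < s.length then
    let two := String.ofList (PySem.List.slice s (some (i : Int)) (some ((i : Int) + 2)))
    if i + 1 < s.length ∧ TRANSLIT.contains two then
      -- TRANSLIT[s[i:i+2]]: the guard makes the key present, so the getD default is never used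
      rootLoopA s (i + 2) (chars ++ [(TRANSLIT.get? two).getD ""])
    else
      let c := String.ofList [s[i]]
      rootLoopA s (i + 1) (chars ++ [TRANSLIT.getD c c])
  else chars
termination_by s.length - i

def root_to_chars (root_str : String) : List String := rootLoopA root_str.toList 0 []

-- ===== PORT B =====
def digraphKeys : List String := ["kh","gh","ch","jh","Th","Dh","th","dh","ph","bh","sh","ng"]

-- regex findall with pattern kh|gh|…|ng|[\s\S]: leftmost scan, digraph alternatives tried first
def tokenizeB : List Char → List String
  | [] => []
  | [c] => [String.ofList [c]]
  | c1 :: c2 :: rest =>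
    if String.ofList [c1, c2] ∈ digraphKeys then String.ofList [c1, c2] :: tokenizeB rest
    else String.ofList [c1] :: tokenizeB (c2 :: rest)

def root_to_chars_alt (root_str : String) : List String :=
  (tokenizeB root_str.toList).map (fun tok => TRANSLIT.getD tok tok)

-- ===== PRECONDITION & SPEC =====
def Spec_root_to_chars (root_str : String) (out : List String) : Prop := out = root_to_chars_alt root_str
instance (root_str : String) (out : List String) : Decidable (Spec_root_to_chars root_str out) := by unfold Spec_root_to_chars; infer_instance

-- ===== CLAIM (what is proved, stated in full; the proofs are below) =====
def Claim_equal_root_to_chars : Prop := ∀ (root_str : String), Dom_root_to_chars root_str → Spec_root_to_chars root_str (root_to_chars root_str)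

-- ===== LEMMAS AND PROOFS =====

-- a 2-char string is a key of TRANSLIT iff it is one of the twelve digraphs
lemma contains_two (c1 c2 : Char) :
    TRANSLIT.contains (String.ofList [c1, c2]) = decide (String.ofList [c1, c2] ∈ digraphKeys) := by
  have h : TRANSLIT = PySem.Dict.mk
    [("A","A"),("I","I"),("U","U"),("R","R"),
     ("kh","K"),("gh","G"),("ch","C"),("jh","J"),
     ("Th","Q"),("Dh","X"),("th","H"),("dh","W"),
     ("ph","P"),("bh","B"),("sh","z"),("sh2","x"),("ng","N")] := by decide
  rw [h, Bool.eq_iff_iff]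
  simp [digraphKeys, String.ext_iff, @eq_comm Char]

-- on a digraph key the raw lookup and the defaulted lookup agree
lemma get_digraph (t : String) (h : t ∈ digraphKeys) :
    (TRANSLIT.get? t).getD "" = TRANSLIT.getD t t := by
  simp only [digraphKeys, List.mem_cons, List.not_mem_nil, or_false] at h
  rcases h with rfl|rfl|rfl|rfl|rfl|rfl|rfl|rfl|rfl|rfl|rfl|rfl <;> decide

-- loop invariant: from position i on, A's loop appends exactly the translations of B's tokens of s.drop i
lemma rootLoopA_eq (s : List Char) : ∀ (n i : Nat) (chars : List String), s.length - i ≤ n →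
    rootLoopA s i chars = chars ++ (tokenizeB (s.drop i)).map (fun tok => TRANSLIT.getD tok tok) := by
  intro n
  induction n with
  | zero =>
    intro i chars h
    rw [rootLoopA]
    have hi : ¬ i < s.length := by omega
    simp [hi, List.drop_eq_nil_of_le (by omega : s.length ≤ i), tokenizeB]
  | succ n ih =>
    intro i chars h
    rw [rootLoopA]
    by_cases hi : i < s.length
    · simp only [hi, dite_true]
      have hslice : PySem.List.slice s (some (i : Int)) (some ((i : Int) + 2))
          = (s.drop i).take 2 := by
        have := PySem.List.slice_natCast_add s i 2
        simpa using this
      have hlen : (s.drop i).length = s.length - i := List.length_drop ..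
      obtain ⟨c1, t1, heq⟩ : ∃ c1 t1, s.drop i = c1 :: t1 := by
        cases hd : s.drop i with
        | nil => exact absurd hlen (by rw [hd]; simp; omega)
        | cons a b => exact ⟨a, b, rfl⟩
      have hc1 : s[i] = c1 := by
        have h1 : s[i]? = some c1 := by rw [← List.head?_drop, heq]; rfl
        simpa [List.getElem?_eq_getElem hi] using h1
      by_cases hi2 : i + 1 < s.length
      · obtain ⟨c2, t2, heq1⟩ : ∃ c2 t2, t1 = c2 :: t2 := by
          cases hd : t1 with
          | nil => rw [heq, hd] at hlen; simp at hlen; omega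
          | cons a b => exact ⟨a, b, rfl⟩
        have htake : (s.drop i).take 2 = [c1, c2] := by rw [heq, heq1]; rfl
        have hdrop2 : s.drop (i + 2) = t2 := by
          have h2 : s.drop (i + 2) = (s.drop i).drop 2 := by rw [List.drop_drop]
          rw [h2, heq, heq1]; rfl
        rw [hslice, htake]
        by_cases hd : String.ofList [c1, c2] ∈ digraphKeys
        · have hc : TRANSLIT.contains (String.ofList [c1, c2]) = true := by
            rw [contains_two]; simpa using hd
          simp only [hi2, hc, and_self, if_true]
          rw [ih (i + 2) _ (by omega), hdrop2, heq, heq1, tokenizeB, if_pos hd]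
          simp [get_digraph _ hd]
        · have hc : TRANSLIT.contains (String.ofList [c1, c2]) = false := by
            rw [contains_two]; simpa using hd
          simp only [hi2, hc, Bool.false_eq_true, and_false, if_false]
          have hdrop1 : s.drop (i + 1) = t1 := by
            have h1 : s.drop (i + 1) = (s.drop i).drop 1 := by rw [List.drop_drop]
            rw [h1, heq]; rfl
          rw [ih (i + 1) _ (by omega), hdrop1, heq, heq1, tokenizeB, if_neg hd, hc1]
          simp
      · have hone : t1 = [] := by
          rw [heq] at hlen
          cases t1 with
          | nil => rfl
          | cons a b => simp at hlen; omega
        simp only [hi2, false_and, if_false]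
        have hdrop1 : s.drop (i + 1) = [] :=
          List.drop_eq_nil_of_le (by omega : s.length ≤ i + 1)
        rw [ih (i + 1) _ (by omega), hdrop1, heq, hone, hc1]
        simp [tokenizeB]
    · simp [hi, List.drop_eq_nil_of_le (by omega : s.length ≤ i), tokenizeB]

-- ===== VERDICT (by name: the statement is the Claim_ definition above) =====
theorem root_to_chars_spec : Claim_equal_root_to_chars := by
  intro s _
  show root_to_chars s = root_to_chars_alt s
  rw [root_to_chars, root_to_chars_alt, rootLoopA_eq s.toList (s.toList.length) 0 [] (by omega)]
  simp
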